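-- pv_equiv track=rewrite | github.com/mattmiller899/GirusApp | create_hdf5_files_mpi.py | chunk_total_dataset
-- ===== SOURCE A (Python) =====
-- def chunk_total_dataset(file_tuples, num_files_per_fold, num_folds):
--     ret_arr = []
--     count_arr = []
--     curr_fold = []
--     #TODO CHANGE BACK
--     fold_count = 0
--     contig_count = 0
--     for i, (input_file, curr_num_contigs) in enumerate(file_tuples):
--         if i % num_files_per_fold == 0 and i != 0 and fold_count != num_folds-1:
--             ret_arr.append(curr_fold)
--             count_arr.append(contig_count)
--             curr_fold = []
--             fold_count += 1
--             contig_count = 0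
--         curr_fold.append("{}/c{}-{}".format(input_file, 0, curr_num_contigs))
--         contig_count += curr_num_contigs
--     #Handle last set
--     ret_arr.append(curr_fold)
--     count_arr.append(contig_count)
--     return ret_arr, count_arr
-- ===== SOURCE B (Python) =====
-- def chunk_total_dataset(file_tuples, num_files_per_fold, num_folds):
--     chunks = []
--     rest = list(file_tuples)
--     while len(rest) > num_files_per_fold and len(chunks) < num_folds - 1:
--         chunks.append(rest[:num_files_per_fold])
--         rest = rest[num_files_per_fold:]
--     chunks.append(rest)
--     ret_arr = [["{}/c0-{}".format(f, c) for f, c in ch] for ch in chunks]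
--     count_arr = [sum(c for _, c in ch) for ch in chunks]
--     return ret_arr, count_arr
-- ===== Notes on version B (the rewrite author's own statement) =====
-- stated objective: alternative
-- what changed: B replaces A's single indexed pass (enumerate with i % num_files_per_fold tests and five running accumulators) by plain list chunking: a while loop that repeatedly takes/drops num_files_per_fold elements (capped at num_folds-1 cuts), then formats and sums each chunk with two comprehensions; …
-- outside the precondition, e.g. on chunk_total_dataset([('a', 0)], -1, 2): A returns ([['a/c0-0']], [0]), B returns ([[], ['a/c0-0']], [0, 0])
import Mathlib
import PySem

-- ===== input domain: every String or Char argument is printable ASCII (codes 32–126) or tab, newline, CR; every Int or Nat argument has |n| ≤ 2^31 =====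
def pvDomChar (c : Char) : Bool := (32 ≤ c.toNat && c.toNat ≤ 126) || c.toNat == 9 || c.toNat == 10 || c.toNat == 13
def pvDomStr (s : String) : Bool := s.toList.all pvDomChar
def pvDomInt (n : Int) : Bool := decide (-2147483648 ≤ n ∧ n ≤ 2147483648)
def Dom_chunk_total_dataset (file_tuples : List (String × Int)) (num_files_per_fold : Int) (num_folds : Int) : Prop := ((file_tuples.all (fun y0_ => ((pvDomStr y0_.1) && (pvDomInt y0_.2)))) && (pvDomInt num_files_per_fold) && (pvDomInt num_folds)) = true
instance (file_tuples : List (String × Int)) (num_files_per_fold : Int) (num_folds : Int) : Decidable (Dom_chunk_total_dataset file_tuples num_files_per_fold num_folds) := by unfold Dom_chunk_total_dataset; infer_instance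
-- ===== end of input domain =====

-- B chunks the list with a while loop of repeated take/drop of num_files_per_fold elements
-- (at most num_folds-1 cuts) and then formats/sums each chunk with two comprehensions, instead
-- of A's single indexed pass with modulo tests and five running accumulators (objective:
-- alternative decomposition; return value only, neither mutates its input).

-- "{}/c{}-{}".format(input_file, 0, curr_num_contigs) — shared by both Pythons verbatim
def pvFmt (p : String × Int) : String := p.1 ++ "/c0-" ++ PySem.Int.toStr p.2

-- ===== PORT A =====
-- A's loop body: state = (ret_arr, count_arr, curr_fold, fold_count, contig_count)
def pvStepA (num_files_per_fold num_folds : Int)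
    (st : List (List String) × List Int × List String × Int × Int)
    (ix : Int × (String × Int)) : List (List String) × List Int × List String × Int × Int :=
  let st' :=
    if PySem.Int.mod ix.1 num_files_per_fold = 0 ∧ ix.1 ≠ 0 ∧ st.2.2.2.1 ≠ num_folds - 1 then
      (st.1 ++ [st.2.2.1], st.2.1 ++ [st.2.2.2.2], ([] : List String), st.2.2.2.1 + 1, (0 : Int))
    else st
  (st'.1, st'.2.1, st'.2.2.1 ++ [pvFmt ix.2], st'.2.2.2.1, st'.2.2.2.2 + ix.2.2)

def chunk_total_dataset (file_tuples : List (String × Int)) (num_files_per_fold : Int) (num_folds : Int) : List (List String) × List Int :=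
  let fin := (PySem.List.enumerate file_tuples).foldl (pvStepA num_files_per_fold num_folds)
    ([], [], [], 0, 0)
  (fin.1 ++ [fin.2.2.1], fin.2.1 ++ [fin.2.2.2.2])

-- ===== PORT B =====
-- B's while loop; fuel only makes the recursion structural.  It is called with
-- fuel = len(file_tuples) + num_folds.toNat, which always suffices: the cap
-- len(chunks) < num_folds - 1 bounds the iterations by num_folds.
-- rest[:m]/rest[m:] are PySem slices, exact for every m.
def pvChunkLoop (m nf : Int) : Nat → List (String × Int) → List (List (String × Int)) → List (List (String × Int))
  | 0, rest, chunks => chunks ++ [rest]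
  | fuel + 1, rest, chunks =>
    if m < (rest.length : Int) ∧ (chunks.length : Int) < nf - 1 then
      pvChunkLoop m nf fuel (PySem.List.slice rest (some m) none) (chunks ++ [PySem.List.slice rest none (some m)])
    else chunks ++ [rest]

-- sum(c for _, c in ch)
def pvSumc (ch : List (String × Int)) : Int := ch.foldl (fun s p => s + p.2) 0

def chunk_total_dataset_alt (file_tuples : List (String × Int)) (num_files_per_fold : Int) (num_folds : Int) : List (List String) × List Int :=
  let chunks := pvChunkLoop num_files_per_fold num_folds (file_tuples.length + num_folds.toNat) file_tuples []
  (chunks.map (fun ch => ch.map pvFmt), chunks.map pvSumc)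

-- ===== PRECONDITION & SPEC =====
-- Pre_ admits the natural domain (fold size ≥ 1 and fold count ≥ 1) plus the degenerate corners
-- where no split can occur (a single requested fold; a non-positive fold count with at most
-- |fold size| files; empty input with nonnegative fold size); it excludes fold size 0 with
-- nonempty input, where A raises ZeroDivisionError, and the remaining negative-fold-size /
-- non-positive-fold-count combinations, where A's splitting (modulo by a negative divisor, a
-- fold cap that can never fire) is accidental and unspecified.
def Pre_chunk_total_dataset (file_tuples : List (String × Int)) (num_files_per_fold : Int) (num_folds : Int) : Prop :=
  (1 ≤ num_files_per_fold ∧ 1 ≤ num_folds) ∨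
  (num_files_per_fold ≠ 0 ∧ num_folds = 1) ∨
  (num_files_per_fold ≠ 0 ∧ num_folds ≤ 0 ∧ (file_tuples.length : Int) ≤ |num_files_per_fold|) ∨
  (file_tuples = [] ∧ 0 ≤ num_files_per_fold)
instance (file_tuples : List (String × Int)) (num_files_per_fold : Int) (num_folds : Int) : Decidable (Pre_chunk_total_dataset file_tuples num_files_per_fold num_folds) := by unfold Pre_chunk_total_dataset; infer_instance

def pvWitness_chunk_total_dataset : (List (String × Int)) × Int × Int := ([("a", 1), ("b", 2), ("c", 3)], 2, 2)


def Spec_chunk_total_dataset (file_tuples : List (String × Int)) (num_files_per_fold : Int) (num_folds : Int) (out : List (List String) × List Int) : Prop := out = chunk_total_dataset_alt file_tuples num_files_per_fold num_folds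
instance (file_tuples : List (String × Int)) (num_files_per_fold : Int) (num_folds : Int) (out : List (List String) × List Int) : Decidable (Spec_chunk_total_dataset file_tuples num_files_per_fold num_folds out) := by unfold Spec_chunk_total_dataset; infer_instance

-- ===== CLAIM (what is proved, stated in full; the proofs are below) =====
def Claim_equal_chunk_total_dataset : Prop := ∀ (file_tuples : List (String × Int)) (num_files_per_fold : Int) (num_folds : Int), Dom_chunk_total_dataset file_tuples num_files_per_fold num_folds → Pre_chunk_total_dataset file_tuples num_files_per_fold num_folds → Spec_chunk_total_dataset file_tuples num_files_per_fold num_folds (chunk_total_dataset file_tuples num_files_per_fold num_folds)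

-- ===== LEMMAS AND PROOFS =====

lemma pvSumc_eq (ch : List (String × Int)) : pvSumc ch = (ch.map (fun p => p.2)).sum := by
  simpa using PySem.List.foldl_add ch (fun p => p.2) 0
lemma pvStepA_pos (m0 nf : Int) (R : List (List String)) (C : List Int) (cur : List String)
    (fc cc : Int) (i : Int) (x : String × Int)
    (h : PySem.Int.mod i m0 = 0 ∧ i ≠ 0 ∧ fc ≠ nf - 1) :
    pvStepA m0 nf (R, C, cur, fc, cc) (i, x) = (R ++ [cur], C ++ [cc], [pvFmt x], fc + 1, x.2) := by
  simp [pvStepA, h]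
lemma pvStepA_neg (m0 nf : Int) (R : List (List String)) (C : List Int) (cur : List String)
    (fc cc : Int) (i : Int) (x : String × Int)
    (h : ¬ (PySem.Int.mod i m0 = 0 ∧ i ≠ 0 ∧ fc ≠ nf - 1)) :
    pvStepA m0 nf (R, C, cur, fc, cc) (i, x) = (R, C, cur ++ [pvFmt x], fc, cc + x.2) := by
  simp [pvStepA, h]
lemma pvNotDvd {m j t : Int} (hm : 0 < m) (h1 : t * m < j) (h2 : j < (t + 1) * m) : ¬ m ∣ j := by
  rintro ⟨q, rfl⟩
  have hq1 : t < q := by nlinarith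
  have hq2 : q < t + 1 := by nlinarith
  omega
lemma pvRun (m0 nf : Int) (blk : List (String × Int)) :
    ∀ (i : Int) (R : List (List String)) (C : List Int) (cur : List String) (fc cc : Int),
    (∀ k : Nat, k < blk.length → ¬ (PySem.Int.mod (i + (k : Int)) m0 = 0 ∧ i + (k : Int) ≠ 0 ∧ fc ≠ nf - 1)) →
    List.foldl (pvStepA m0 nf) (R, C, cur, fc, cc) (PySem.List.enumerate blk i)
      = (R, C, cur ++ blk.map pvFmt, fc, cc + pvSumc blk) := by
  induction blk with
  | nil => intro i R C cur fc cc _; simp [PySem.List.enumerate_nil, pvSumc]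
  | cons x blk ih =>
    intro i R C cur fc cc h
    have h0 := h 0 (by simp)
    rw [PySem.List.enumerate_cons, List.foldl_cons, pvStepA_neg m0 nf _ _ _ _ _ _ _ (by simpa using h0)]
    rw [ih (i + 1) R C (cur ++ [pvFmt x]) fc (cc + x.2) ?_]
    · simp [pvSumc_eq]; ring
    · intro k hk
      have := h (k + 1) (by simpa using Nat.succ_lt_succ hk)
      push_cast at this ⊢
      have e : i + 1 + (k : Int) = i + ((k : Int) + 1) := by ring
      rw [e]; exact this
lemma pvChunkLoop_else (m nf : Int) (rest : List (String × Int)) (chunks : List (List (String × Int)))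
    (fuel : Nat)
    (h : ¬ (m < (rest.length : Int) ∧ (chunks.length : Int) < nf - 1)) :
    pvChunkLoop m nf fuel rest chunks = chunks ++ [rest] := by
  cases fuel with
  | zero => rfl
  | succ fuel => simp [pvChunkLoop, h]

lemma pvSumc_cons (y : String × Int) (l : List (String × Int)) :
    pvSumc (y :: l) = y.2 + pvSumc l := by simp [pvSumc_eq]

lemma pvNoSplitMid (m0 : Int) (hm0 : 1 ≤ m0) (c : Int) (_hc : 0 ≤ c) (k : Int) (h1 : 0 < k) (h2 : k < m0) :
    PySem.Int.mod ((c + 1) * m0 + k) m0 ≠ 0 := by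
  intro h
  have hd : m0 ∣ (c + 1) * m0 + k := (PySem.Int.mod_eq_zero_iff_dvd _ _).mp h
  have he : ((c + 1) + 1) * m0 = (c + 1) * m0 + m0 := by ring
  exact pvNotDvd (t := c + 1) (by omega) (by omega) (by omega) hd

lemma pvMain (m0 nf : Int) (hm0 : 1 ≤ m0) :
    ∀ (fuel : Nat) (rem blk : List (String × Int)) (chunks : List (List (String × Int))),
    rem.length ≤ fuel →
    ((blk.length : Int) = m0) →
    ((chunks.length : Int) ≤ nf - 1) →
    (let st := List.foldl (pvStepA m0 nf)
        (chunks.map (List.map pvFmt), chunks.map pvSumc, blk.map pvFmt, (chunks.length : Int), pvSumc blk)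
        (PySem.List.enumerate rem (((chunks.length : Int) + 1) * m0));
      (st.1 ++ [st.2.2.1], st.2.1 ++ [st.2.2.2.2]))
    = ((pvChunkLoop m0 nf fuel (blk ++ rem) chunks).map (List.map pvFmt),
       (pvChunkLoop m0 nf fuel (blk ++ rem) chunks).map pvSumc) := by
  have hmt : (((m0).toNat : Nat) : Int) = m0 := Int.toNat_of_nonneg (by omega)
  intro fuel
  induction fuel with
  | zero =>
    intro rem blk chunks hF _ _
    have hrem : rem = [] := List.eq_nil_of_length_eq_zero (Nat.le_zero.mp hF)
    subst hrem
    simp [PySem.List.enumerate_nil, pvChunkLoop]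
  | succ fuel ih =>
    intro rem blk chunks hF hB hbud
    dsimp only
    have hc0 : (0:Int) ≤ (chunks.length : Int) := Int.natCast_nonneg _
    have hBt : blk.length = m0.toNat := by omega
    by_cases hg : m0 < (((blk ++ rem).length : Nat) : Int) ∧ (chunks.length : Int) < nf - 1
    · -- guard true: a split happens at the first remaining index
      have hlen : 0 < rem.length := by
        have h2 := hg.1
        simp only [List.length_append] at h2
        omega
      obtain ⟨x, rem', rfl⟩ : ∃ x rem', rem = x :: rem' := by
        cases rem with
        | nil => simp at hlen
        | cons a b => exact ⟨a, b, rfl⟩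
      have hF' : rem'.length ≤ fuel := by
        simp only [List.length_cons] at hF; omega
      have hstep : pvChunkLoop m0 nf (fuel+1) (blk ++ x :: rem') chunks
          = pvChunkLoop m0 nf fuel (x :: rem') (chunks ++ [blk]) := by
        simp only [pvChunkLoop, if_pos hg]
        rw [← hmt, PySem.List.slice_from_natCast, PySem.List.slice_to_natCast,
          ← hBt, List.drop_left, List.take_left]
      rw [hstep]
      have hcond : PySem.Int.mod (((chunks.length : Int) + 1) * m0) m0 = 0 ∧
          ((chunks.length : Int) + 1) * m0 ≠ 0 ∧ (chunks.length : Int) ≠ nf - 1 := by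
        refine ⟨(PySem.Int.mod_eq_zero_iff_dvd _ _).mpr (Dvd.dvd.mul_left dvd_rfl _), ?_, ?_⟩
        · have := mul_pos (show (0:Int) < (chunks.length : Int) + 1 by omega) (show (0:Int) < m0 by omega)
          omega
        · omega
      rw [PySem.List.enumerate_cons, List.foldl_cons,
        pvStepA_pos m0 nf _ _ _ _ _ _ _ hcond]
      by_cases hbig : m0.toNat - 1 ≤ rem'.length
      · -- a full next block exists
        have hruncond : ∀ k : Nat, k < (rem'.take (m0.toNat - 1)).length →
            ¬ (PySem.Int.mod ((((chunks.length : Int) + 1) * m0 + 1) + (k : Int)) m0 = 0 ∧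
               (((chunks.length : Int) + 1) * m0 + 1) + (k : Int) ≠ 0 ∧
               ((chunks.length : Int) + 1) ≠ nf - 1) := by
          intro k hk hco
          have hk' : k < m0.toNat - 1 := by
            rw [List.length_take] at hk; omega
          have := pvNoSplitMid m0 hm0 (chunks.length : Int) hc0 (1 + (k : Int)) (by omega) (by omega)
          exact this (by rw [show ((chunks.length : Int) + 1) * m0 + (1 + (k : Int))
            = (((chunks.length : Int) + 1) * m0 + 1) + (k : Int) from by ring]; exact hco.1)
        conv_lhs => rw [← List.take_append_drop (m0.toNat - 1) rem',
          PySem.List.enumerate_append, List.foldl_append]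
        rw [pvRun m0 nf (rem'.take (m0.toNat - 1)) _ _ _ _ _ _ hruncond]
        have hlen_take : (rem'.take (m0.toNat - 1)).length = m0.toNat - 1 := by
          rw [List.length_take]; omega
        rw [hlen_take]
        rw [show ((chunks.length : Int) + 1) * m0 + 1 + (((m0.toNat - 1 : Nat)) : Int)
            = ((chunks.length : Int) + 1 + 1) * m0 from by
          have h1 : (((m0.toNat - 1 : Nat)) : Int) = m0 - 1 := by omega
          rw [h1]; ring]
        rw [List.singleton_append, ← List.map_cons, ← pvSumc_cons]
        have IH := ih (rem'.drop (m0.toNat - 1)) (x :: rem'.take (m0.toNat - 1))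
          (chunks ++ [blk]) (by rw [List.length_drop]; omega)
          (by simp only [List.length_cons, hlen_take]; push_cast; omega)
          (by simp only [List.length_append, List.length_cons, List.length_nil]; push_cast; omega)
        dsimp only at IH
        simp only [List.length_append, List.length_cons, List.length_nil, List.map_append,
          List.map_cons, List.map_nil, List.cons_append, List.take_append_drop] at IH
        push_cast at IH
        exact IH
      · -- the remainder is shorter than a block: it all joins the new fold
        have hruncond : ∀ k : Nat, k < rem'.length →
            ¬ (PySem.Int.mod ((((chunks.length : Int) + 1) * m0 + 1) + (k : Int)) m0 = 0 ∧
               (((chunks.length : Int) + 1) * m0 + 1) + (k : Int) ≠ 0 ∧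
               ((chunks.length : Int) + 1) ≠ nf - 1) := by
          intro k hk hco
          have := pvNoSplitMid m0 hm0 (chunks.length : Int) hc0 (1 + (k : Int)) (by omega) (by omega)
          exact this (by rw [show ((chunks.length : Int) + 1) * m0 + (1 + (k : Int))
            = (((chunks.length : Int) + 1) * m0 + 1) + (k : Int) from by ring]; exact hco.1)
        rw [pvRun m0 nf rem' _ _ _ _ _ _ hruncond]
        rw [pvChunkLoop_else _ _ _ _ _ (by
          intro hgg
          have h2 := hgg.1
          simp only [List.length_cons] at h2
          omega)]
        simp [pvSumc_cons, List.map_append]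
    · -- guard false: no further split; whole rem joins the current fold
      have hrun := pvRun m0 nf rem (((chunks.length : Int) + 1) * m0)
        (chunks.map (List.map pvFmt)) (chunks.map pvSumc) (blk.map pvFmt)
        ((chunks.length : Int)) (pvSumc blk) ?_
      · rw [hrun, pvChunkLoop_else _ _ _ _ _ hg]
        simp [pvSumc_eq, List.map_append]
      · intro k hk hcond
        apply hg
        refine ⟨?_, ?_⟩
        · simp only [List.length_append]
          push_cast
          omega
        · have := hcond.2.2; omega

lemma pvTop (ft : List (String × Int)) (m0 nf : Int) (hm0 : 1 ≤ m0) (hnf : 1 ≤ nf) :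
    chunk_total_dataset ft m0 nf = chunk_total_dataset_alt ft m0 nf := by
  cases ft with
  | nil =>
    unfold chunk_total_dataset chunk_total_dataset_alt
    rw [pvChunkLoop_else _ _ _ _ _ (by simp; omega)]
    simp [PySem.List.enumerate_nil, pvSumc]
  | cons x ft' =>
    have hmt : (((m0).toNat : Nat) : Int) = m0 := Int.toNat_of_nonneg (by omega)
    unfold chunk_total_dataset chunk_total_dataset_alt
    dsimp only
    rw [PySem.List.enumerate_cons, List.foldl_cons,
      pvStepA_neg m0 nf _ _ _ _ _ _ _ (by simp)]
    by_cases hbig : m0.toNat - 1 ≤ ft'.length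
    · have hruncond : ∀ k : Nat, k < (ft'.take (m0.toNat - 1)).length →
          ¬ (PySem.Int.mod ((0:Int) + 1 + (k : Int)) m0 = 0 ∧ (0:Int) + 1 + (k : Int) ≠ 0 ∧
             (0:Int) ≠ nf - 1) := by
        intro k hk hco
        have hk' : k < m0.toNat - 1 := by rw [List.length_take] at hk; omega
        have hd : m0 ∣ (0:Int) + 1 + (k : Int) := (PySem.Int.mod_eq_zero_iff_dvd _ _).mp hco.1
        exact pvNotDvd (t := 0) (by omega) (by omega) (by omega) hd
      conv_lhs => rw [← List.take_append_drop (m0.toNat - 1) ft',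
        PySem.List.enumerate_append, List.foldl_append]
      rw [pvRun m0 nf (ft'.take (m0.toNat - 1)) _ _ _ _ _ _ hruncond]
      have hlen_take : (ft'.take (m0.toNat - 1)).length = m0.toNat - 1 := by
        rw [List.length_take]; omega
      rw [hlen_take]
      rw [show (0:Int) + 1 + (((m0.toNat - 1 : Nat)) : Int) = ((0:Int) + 1) * m0 from by
        have h1 : (((m0.toNat - 1 : Nat)) : Int) = m0 - 1 := by omega
        rw [h1]; ring]
      rw [List.nil_append, List.singleton_append, ← List.map_cons]
      rw [show (0:Int) + x.2 + pvSumc (List.take (m0.toNat - 1) ft')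
          = pvSumc (x :: List.take (m0.toNat - 1) ft') from by rw [pvSumc_cons]; ring]
      have IH := pvMain m0 nf hm0 (ft'.length + 1 + nf.toNat) (ft'.drop (m0.toNat - 1))
        (x :: ft'.take (m0.toNat - 1)) []
        (by rw [List.length_drop]; omega)
        (by simp only [List.length_cons, hlen_take]; push_cast; omega)
        (by simp; omega)
      dsimp only at IH
      simp only [List.length_nil, List.length_cons, List.map_nil, List.map_cons,
        List.cons_append, List.take_append_drop, List.nil_append] at IH
      push_cast at IH
      simp only [List.length_cons] at IH ⊢
      convert IH using 3 <;> simp [pvSumc]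
    · have hruncond : ∀ k : Nat, k < ft'.length →
          ¬ (PySem.Int.mod ((0:Int) + 1 + (k : Int)) m0 = 0 ∧ (0:Int) + 1 + (k : Int) ≠ 0 ∧
             (0:Int) ≠ nf - 1) := by
        intro k hk hco
        have hd : m0 ∣ (0:Int) + 1 + (k : Int) := (PySem.Int.mod_eq_zero_iff_dvd _ _).mp hco.1
        exact pvNotDvd (t := 0) (by omega) (by omega) (by omega) hd
      rw [pvRun m0 nf ft' _ _ _ _ _ _ hruncond]
      rw [pvChunkLoop_else _ _ _ _ _ (by
        intro hgg
        have h2 := hgg.1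
        simp only [List.length_cons] at h2
        omega)]
      simp [pvSumc_cons, pvSumc, PySem.List.foldl_add]

-- Both sides collapse to a single fold when A never splits and B's while guard is false at entry.
lemma pvSingle (ft : List (String × Int)) (m nf : Int)
    (hA : ∀ k : Nat, k < ft.length →
      ¬ (PySem.Int.mod ((0:Int) + (k : Int)) m = 0 ∧ (0:Int) + (k : Int) ≠ 0 ∧ (0:Int) ≠ nf - 1))
    (hB : ¬ (m < (ft.length : Int) ∧ (0:Int) < nf - 1)) :
    chunk_total_dataset ft m nf = chunk_total_dataset_alt ft m nf := by
  unfold chunk_total_dataset chunk_total_dataset_alt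
  dsimp only
  rw [pvRun m nf ft 0 [] [] [] 0 0 hA]
  rw [pvChunkLoop_else _ _ _ _ _ (by simpa using hB)]
  simp [pvSumc]

-- ===== VERDICT (by name: the statement is the Claim_ definition above) =====
theorem chunk_total_dataset_spec : Claim_equal_chunk_total_dataset := by
  intro ft m nf _ hpre
  unfold Spec_chunk_total_dataset
  unfold Pre_chunk_total_dataset at hpre
  rcases hpre with ⟨h1, h2⟩ | ⟨hm, hnf⟩ | ⟨hm, hnf, hlen⟩ | ⟨hft, hm⟩
  · exact pvTop ft m nf h1 h2
  · -- num_folds = 1: A's fold cap forbids every split; B's cap is false at entry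
    apply pvSingle
    · intro k hk hc; exact hc.2.2 (by omega)
    · intro hc; omega
  · -- num_folds ≤ 0 and too few files for any index divisible by the fold size
    apply pvSingle
    · intro k hk hc
      rcases Nat.eq_zero_or_pos k with rfl | hkpos
      · exact hc.2.1 (by simp)
      · have hd : |m| ∣ (0:Int) + (k : Int) :=
          (abs_dvd _ _).mpr ((PySem.Int.mod_eq_zero_iff_dvd _ _).mp hc.1)
        have hkm : ((k : Nat) : Int) < |m| := by
          have : ((k : Nat) : Int) < (ft.length : Int) := by exact_mod_cast hk
          omega
        exact pvNotDvd (t := 0) (abs_pos.mpr hm) (by push_cast; omega) (by push_cast; omega) hd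
    · intro hc; omega
  · -- empty input with nonnegative fold size: one empty fold on both sides
    subst hft
    apply pvSingle
    · intro k hk; simp at hk
    · intro hc
      have := hc.1
      simp at this
      omega
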